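-- pv_equiv track=rewrite | github.com/GlebMozglyakov/Algorithms-RTF-4-semester | 1. Binary search/Task 1.py | find_optimal_position
-- ===== SOURCE A (Python) =====
-- def find_optimal_position(value, n):
--     left_count = 0
--     right_count = n.count(value)
--
--     non_equal_right = len(n) - right_count
--     optimal_product = 0
--
--     for el in n:
--         if el == value:
--             left_count += 1
--             right_count -= 1
--         else:
--             non_equal_right -= 1
--         optimal_product = max(optimal_product, left_count * non_equal_right)
--
--     return optimal_product
-- ===== SOURCE B (Python) =====
-- def find_optimal_position(value, n):
--     # Three passes over materialized tables: prefix[i] = #equal in n[0..i],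
--     # suffix[i] = #non-equal in n[i+1..]; answer = max over i of prefix[i]*suffix[i].
--     prefix = []
--     c = 0
--     for el in n:
--         if el == value:
--             c += 1
--         prefix.append(c)
--     suffix = []
--     c = 0
--     for el in reversed(n):
--         suffix.append(c)
--         if el != value:
--             c += 1
--     suffix.reverse()
--     best = 0
--     for p, s in zip(prefix, suffix):
--         best = max(best, p * s)
--     return best
-- ===== Notes on version B (the rewrite author's own statement) =====
-- stated objective: alternative
-- what changed: Replaces A's single loop carrying four running counters with a table-based decomposition: a forward pass materializing prefix counts of equal elements, a reverse pass materializing strict-suffix counts of non-equal elements, and a final pass taking the max product over the zipped tables.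
import Mathlib
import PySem

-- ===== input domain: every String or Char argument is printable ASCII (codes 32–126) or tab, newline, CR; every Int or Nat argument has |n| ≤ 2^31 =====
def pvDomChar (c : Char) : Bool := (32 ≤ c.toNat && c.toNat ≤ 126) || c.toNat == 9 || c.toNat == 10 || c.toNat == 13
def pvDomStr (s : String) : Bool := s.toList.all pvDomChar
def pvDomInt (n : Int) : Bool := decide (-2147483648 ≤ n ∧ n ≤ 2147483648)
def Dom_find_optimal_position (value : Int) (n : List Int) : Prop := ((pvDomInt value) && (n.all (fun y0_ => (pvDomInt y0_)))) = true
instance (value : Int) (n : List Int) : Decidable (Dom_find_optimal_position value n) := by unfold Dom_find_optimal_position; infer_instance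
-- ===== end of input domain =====

-- B is an alternative decomposition of A (three table-building passes instead of one multi-counter loop); same return value on all inputs.

-- ===== PORT A =====
-- single loop carrying (left_count, right_count, non_equal_right, optimal_product)
def find_optimal_position (value : Int) (n : List Int) : Int :=
  let right_count := PySem.List.count n value
  let st := n.foldl
    (fun (st : Int × Int × Int × Int) el =>
      let (lc, rc, ner, opt) := st
      let (lc, rc, ner) := if el = value then (lc + 1, rc - 1, ner) else (lc, rc, ner - 1)
      (lc, rc, ner, max opt (lc * ner)))
    (0, right_count, (PySem.List.len n : Int) - right_count, 0)
  st.2.2.2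

-- ===== PORT B =====
-- forward pass: running count of elements equal to value (prefix table, inclusive)
def pvPrefix (value : Int) : List Int → Int → List Int
  | [], _ => []
  | el :: rest, c =>
      let c' := if el = value then c + 1 else c
      c' :: pvPrefix value rest c'

-- reverse pass (over the reversed list): emit current non-equal count, then update it
def pvSufRev (value : Int) : List Int → Int → List Int
  | [], _ => []
  | el :: rest, c => c :: pvSufRev value rest (if el ≠ value then c + 1 else c)

def find_optimal_position_alt (value : Int) (n : List Int) : Int :=
  let pre := pvPrefix value n 0
  let suf := (pvSufRev value n.reverse 0).reverse
  (pre.zip suf).foldl (fun b ps => max b (ps.1 * ps.2)) 0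

-- ===== PRECONDITION & SPEC =====
def Spec_find_optimal_position (value : Int) (n : List Int) (out : Int) : Prop := out = find_optimal_position_alt value n
instance (value : Int) (n : List Int) (out : Int) : Decidable (Spec_find_optimal_position value n out) := by unfold Spec_find_optimal_position; infer_instance

-- ===== CLAIM (what is proved, stated in full; the proofs are below) =====
def Claim_equal_find_optimal_position : Prop := ∀ (value : Int) (n : List Int), Dom_find_optimal_position value n → Spec_find_optimal_position value n (find_optimal_position value n)

-- ===== LEMMAS AND PROOFS =====

-- number of elements ≠ value (as an Int)
def pvNe (value : Int) : List Int → Int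
  | [] => 0
  | el :: rest => (if el = value then 0 else 1) + pvNe value rest

-- specification shape of B's suffix table: entry i is c + (#non-equal strictly after i)
def pvSufSpec (value : Int) : List Int → Int → List Int
  | [], _ => []
  | _ :: rest, c => (c + pvNe value rest) :: pvSufSpec value rest c

theorem pvNe_append (value : Int) (xs ys : List Int) :
    pvNe value (xs ++ ys) = pvNe value xs + pvNe value ys := by
  induction xs with
  | nil => simp [pvNe]
  | cons x xs ih => simp [pvNe, ih]; ring

theorem pvNe_reverse (value : Int) (xs : List Int) :
    pvNe value xs.reverse = pvNe value xs := by
  induction xs with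
  | nil => rfl
  | cons x xs ih =>
      simp [List.reverse_cons, pvNe_append, pvNe, ih]; ring

theorem pvSufRev_append (value : Int) (xs ys : List Int) (c : Int) :
    pvSufRev value (xs ++ ys) c = pvSufRev value xs c ++ pvSufRev value ys (c + pvNe value xs) := by
  induction xs generalizing c with
  | nil => simp [pvSufRev, pvNe]
  | cons x xs ih =>
      by_cases h : x = value <;>
        simp [pvSufRev, pvNe, h, ih, add_comm, add_left_comm]

theorem pvSufRev_reverse (value : Int) (xs : List Int) (c : Int) :
    (pvSufRev value xs.reverse c).reverse = pvSufSpec value xs c := by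
  induction xs generalizing c with
  | nil => rfl
  | cons x xs ih =>
      simp only [List.reverse_cons, pvSufRev_append, pvSufRev, pvNe_reverse,
        List.reverse_append, List.reverse_cons, List.reverse_nil, List.nil_append,
        List.cons_append, pvSufSpec, ih]

theorem pv_len_sub_count (value : Int) (n : List Int) :
    (PySem.List.len n : Int) - PySem.List.count n value = pvNe value n := by
  induction n with
  | nil => simp [PySem.List.len, PySem.List.count, pvNe]
  | cons x xs ih =>
      by_cases h : x = value <;>
        simp_all [PySem.List.len, PySem.List.count, pvNe]; omega

theorem pv_main (value : Int) (n : List Int) :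
    ∀ (lc rc opt : Int),
      (n.foldl
        (fun (st : Int × Int × Int × Int) el =>
          let (lc, rc, ner, opt) := st
          let (lc, rc, ner) := if el = value then (lc + 1, rc - 1, ner) else (lc, rc, ner - 1)
          (lc, rc, ner, max opt (lc * ner)))
        (lc, rc, pvNe value n, opt)).2.2.2
      = ((pvPrefix value n lc).zip (pvSufSpec value n 0)).foldl
          (fun b ps => max b (ps.1 * ps.2)) opt := by
  induction n with
  | nil => intro lc rc opt; rfl
  | cons x xs ih =>
      intro lc rc opt
      by_cases h : x = value
      · simpa [pvNe, pvPrefix, pvSufSpec, h] using ih (lc + 1) (rc - 1) (max opt ((lc + 1) * pvNe value xs))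
      · have hne : (if x = value then (0:Int) else 1) + pvNe value xs - 1 = pvNe value xs := by
          simp [h]
        simpa [pvNe, pvPrefix, pvSufSpec, h, hne] using ih lc rc (max opt (lc * pvNe value xs))

-- ===== VERDICT (by name: the statement is the Claim_ definition above) =====
theorem find_optimal_position_spec : Claim_equal_find_optimal_position := by
  intro value n _
  show find_optimal_position value n = find_optimal_position_alt value n
  unfold find_optimal_position find_optimal_position_alt
  simp only [pv_len_sub_count, pvSufRev_reverse, pv_main]
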